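-- pv_equiv track=rewrite | github.com/Mori-kamiyama/procon_W-B | src/utils/io.py | apply_ops
-- ===== SOURCE A (Python) =====
-- from typing import Any, Dict, List, Tuple
--
-- Grid = List[List[int]]
--
-- def apply_ops(grid: Grid, ops: List[Dict[str, int]]) -> Grid:
--     """Apply rotation operations to a grid and return a new grid.
--
--     Operation format: {"x": int, "y": int, "n": int} meaning rotate the n x n
--     subgrid at top-left (y, x) clockwise once.
--     """
--     size = len(grid)
--     g = [row[:] for row in grid]
--
--     def rotate_once(x: int, y: int, n: int) -> None:
--         sub = [[g[y + i][x + j] for j in range(n)] for i in range(n)]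
--         for i in range(n):
--             for j in range(n):
--                 g[y + i][x + j] = sub[n - 1 - j][i]
--
--     for op in ops:
--         x, y, n = int(op["x"]), int(op["y"]), int(op["n"])
--         if not (0 <= x < size and 0 <= y < size and 2 <= n <= size and x + n <= size and y + n <= size):
--             raise ValueError(f"Invalid operation {op} for size {size}")
--         rotate_once(x, y, n)
--     return g
-- ===== SOURCE B (Python) =====
-- from typing import Dict, List
--
-- Grid = List[List[int]]
--
-- def apply_ops(grid: Grid, ops: List[Dict[str, int]]) -> Grid:
--     """Apply rotation operations to a grid and return a new grid (pure rebuild).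
--
--     Each rotation is done functionally: slice out the n x n block row by row,
--     rotate it by reverse-rows-then-transpose, and splice the rotated rows back
--     with list slicing; no in-place per-cell assignment and no full-grid scratch
--     copy beyond the initial one.
--     """
--     size = len(grid)
--     g = [row[:] for row in grid]
--
--     def rotated(g, x, y, n):
--         rows = [g[y + i][x:x + n] for i in range(n)]
--         rot = [[row[i] for row in rows[::-1]] for i in range(n)]
--         return [row[:x] + rot[r - y] + row[x + n:] if y <= r < y + n else row
--                 for r, row in enumerate(g)]
--
--     for op in ops:
--         x, y, n = int(op["x"]), int(op["y"]), int(op["n"])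
--         if not (0 <= x < size and 0 <= y < size and 2 <= n <= size and x + n <= size and y + n <= size):
--             raise ValueError(f"Invalid operation {op} for size {size}")
--         g = rotated(g, x, y, n)
--     return g
-- ===== Notes on version B (the rewrite author's own statement) =====
-- stated objective: alternative
-- what changed: Each rotation is done by slicing out the block's rows and rotating them as whole lists (reverse rows, then transpose) and splicing them back with list slicing, rebuilding the grid functionally, instead of A's snapshot-then-per-cell index-arithmetic write-back into a mutable copy.
import Mathlib
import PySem

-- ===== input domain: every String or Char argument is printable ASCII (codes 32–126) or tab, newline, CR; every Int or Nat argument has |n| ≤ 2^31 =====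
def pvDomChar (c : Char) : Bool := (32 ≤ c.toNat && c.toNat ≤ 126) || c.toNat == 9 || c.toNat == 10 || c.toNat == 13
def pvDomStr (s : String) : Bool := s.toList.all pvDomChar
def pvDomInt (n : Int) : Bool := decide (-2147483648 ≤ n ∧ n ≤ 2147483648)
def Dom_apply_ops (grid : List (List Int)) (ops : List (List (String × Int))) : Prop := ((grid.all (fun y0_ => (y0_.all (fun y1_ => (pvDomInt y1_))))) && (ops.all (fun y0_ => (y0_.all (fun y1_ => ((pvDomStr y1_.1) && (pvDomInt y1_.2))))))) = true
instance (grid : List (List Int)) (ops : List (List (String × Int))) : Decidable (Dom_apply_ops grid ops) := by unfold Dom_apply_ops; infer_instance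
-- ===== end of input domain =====

-- B rotates each n×n block by reverse-rows-then-transpose and splices the rotated rows back with
-- slicing (a pure rebuild), instead of A's per-cell index-arithmetic write-back into a scratch copy;
-- objective: alternative decomposition, same asymptotic cost. Return-value equivalence only
-- (A mutates no argument: it copies the grid first, and so does B).

-- ===== PORT A =====
-- g[r][c] read; exact for the nonnegative in-range indices that occur under Pre_ (Python raises
-- IndexError out of range; those inputs are outside Pre_).
def pvCell (g : List (List Int)) (r c : Int) : Int :=
  PySem.List.pyGetD (PySem.List.pyGetD g r []) c 0

-- g[r][c] = v ; same exactness remark as pvCell.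
def pvSetCell (g : List (List Int)) (r c : Int) (v : Int) : List (List Int) :=
  PySem.List.pySetD g r (PySem.List.pySetD (PySem.List.pyGetD g r []) c v)

-- rotate_once: snapshot sub, then write g[y+i][x+j] = sub[n-1-j][i] for all i, j
def pvRotOnceA (g : List (List Int)) (x y n : Int) : List (List Int) :=
  let sub := (PySem.List.pyRange 0 n 1).map (fun i =>
    (PySem.List.pyRange 0 n 1).map (fun j => pvCell g (y + i) (x + j)))
  (PySem.List.pyRange 0 n 1).foldl (fun s i =>
    (PySem.List.pyRange 0 n 1).foldl (fun s j =>
      pvSetCell s (y + i) (x + j)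
        (PySem.List.pyGetD (PySem.List.pyGetD sub (n - 1 - j) []) i 0)) s) g

def pvValid (size x y n : Int) : Bool :=
  decide (0 ≤ x ∧ x < size ∧ 0 ≤ y ∧ y < size ∧ 2 ≤ n ∧ n ≤ size ∧ x + n ≤ size ∧ y + n ≤ size)

def apply_ops (grid : List (List Int)) (ops : List (List (String × Int))) : List (List Int) :=
  let size : Int := grid.length
  let g := grid.map (fun row => PySem.List.slice row none none)   -- row[:]
  ops.foldl (fun g op =>
    let d := PySem.Dict.ofList op
    match d.get? "x", d.get? "y", d.get? "n" with
    | some x, some y, some n =>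
        if pvValid size x y n then pvRotOnceA g x y n
        else g              -- Python raises ValueError here; excluded by Pre_
    | _, _, _ => g) g       -- Python raises KeyError here; excluded by Pre_

-- ===== PORT B =====
def pvValidAlt (size x y n : Int) : Bool :=
  decide (0 ≤ x ∧ x < size ∧ 0 ≤ y ∧ y < size ∧ 2 ≤ n ∧ n ≤ size ∧ x + n ≤ size ∧ y + n ≤ size)

-- rotated: slice out the block's rows, rotate by reverse-rows-then-transpose, splice back
def pvRotOnceB (g : List (List Int)) (x y n : Int) : List (List Int) :=
  let rows := (PySem.List.pyRange 0 n 1).map (fun i =>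
    PySem.List.slice (PySem.List.pyGetD g (y + i) []) (some x) (some (x + n)))
  let rot := (PySem.List.pyRange 0 n 1).map (fun i =>
    rows.reverse.map (fun row => PySem.List.pyGetD row i 0))
  (PySem.List.enumerate g).map (fun p =>
    if p.1 ≥ y ∧ p.1 < y + n then
      PySem.List.slice p.2 none (some x) ++ PySem.List.pyGetD rot (p.1 - y) []
        ++ PySem.List.slice p.2 (some (x + n)) none
    else p.2)

def apply_ops_alt (grid : List (List Int)) (ops : List (List (String × Int))) : List (List Int) :=
  let size : Int := grid.length
  let g := grid.map (fun row => PySem.List.slice row none none)   -- row[:]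
  ops.foldl (fun g op =>
    let d := PySem.Dict.ofList op
    match d.get? "x" with
    | none => g             -- KeyError; excluded by Pre_
    | some x =>
      match d.get? "y" with
      | none => g           -- KeyError; excluded by Pre_
      | some y =>
        match d.get? "n" with
        | none => g         -- KeyError; excluded by Pre_
        | some n =>
          if pvValidAlt size x y n then pvRotOnceB g x y n
          else g) g         -- ValueError; excluded by Pre_

-- ===== PRECONDITION & SPEC =====
-- Pre_ excludes exactly the inputs where the Python A raises: an op missing one of the keys
-- "x"/"y"/"n" (KeyError), an op failing A's bounds check (ValueError), and an op whose block
-- reaches past the end of a short row of a ragged grid (IndexError).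
def pvOpOK (grid : List (List Int)) (op : List (String × Int)) : Bool :=
  let d := PySem.Dict.ofList op
  ((d.get? "x").bind fun x =>
    (d.get? "y").bind fun y =>
      (d.get? "n").map fun n =>
        decide (0 ≤ x ∧ x < (grid.length : Int) ∧ 0 ≤ y ∧ y < (grid.length : Int) ∧ 2 ≤ n ∧
          n ≤ (grid.length : Int) ∧ x + n ≤ (grid.length : Int) ∧ y + n ≤ (grid.length : Int)) &&
        decide (∀ i ∈ PySem.List.pyRange 0 n 1,
          x + n ≤ ((grid.getD (y + i).toNat []).length : Int))).getD false

def Pre_apply_ops (grid : List (List Int)) (ops : List (List (String × Int))) : Prop :=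
  ∀ op ∈ ops, pvOpOK grid op = true

instance (grid : List (List Int)) (ops : List (List (String × Int))) : Decidable (Pre_apply_ops grid ops) := by
  unfold Pre_apply_ops; infer_instance

def pvWitness_apply_ops : List (List Int) × (List (List (String × Int))) :=
  ([[1, 2], [3, 4]], [[("x", 0), ("y", 0), ("n", 2)]])

def Spec_apply_ops (grid : List (List Int)) (ops : List (List (String × Int))) (out : List (List Int)) : Prop := out = apply_ops_alt grid ops
instance (grid : List (List Int)) (ops : List (List (String × Int))) (out : List (List Int)) : Decidable (Spec_apply_ops grid ops out) := by unfold Spec_apply_ops; infer_instance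

-- ===== CLAIM (what is proved, stated in full; the proofs are below) =====
def Claim_equal_apply_ops : Prop := ∀ (grid : List (List Int)) (ops : List (List (String × Int))), Dom_apply_ops grid ops → Pre_apply_ops grid ops → Spec_apply_ops grid ops (apply_ops grid ops)

-- ===== LEMMAS AND PROOFS =====

-- the common splice form both rotations reduce to (proof-only helper)
def pvSplice (g : List (List Int)) (X Y N : Nat) : List (List Int) :=
  g.take Y ++ (List.range N).map (fun i =>
      (g.getD (Y + i) []).take X
        ++ (List.range N).map (fun j => (g.getD (Y + (N - 1 - j)) []).getD (X + i) 0)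
        ++ (g.getD (Y + i) []).drop (X + N))
    ++ g.drop (Y + N)

theorem pvSetGetD {α : Type} (l : List α) (n : Nat) (d : α) : l.set n (l[n]?.getD d) = l := by
  rcases Nat.lt_or_ge n l.length with h | h
  · rw [List.getElem?_eq_getElem h]; simp [List.set_getElem_self]
  · exact List.set_eq_of_length_le h

theorem pvFoldSetRow {β : Type} (js : List Nat) (R : Nat) (c : Nat → Nat) (v : Nat → β)
    (s : List (List β)) :
    js.foldl (fun s j => s.set R ((s.getD R []).set (c j) (v j))) s
      = s.set R (js.foldl (fun row j => row.set (c j) (v j)) (s.getD R [])) := by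
  induction js generalizing s with
  | nil => simp [List.getD, pvSetGetD]
  | cons j rest ih =>
    simp only [List.foldl_cons]
    rcases Nat.lt_or_ge R s.length with h | h
    · rw [ih]
      have hg : ((s.set R ((s.getD R []).set (c j) (v j))).getD R []) = (s.getD R []).set (c j) (v j) := by
        simp [List.getD, h]
      rw [hg, List.set_set]
    · have hs : ∀ w, s.set R w = s := fun w => List.set_eq_of_length_le h
      rw [hs, ih, hs, hs]

theorem pvFoldSetSplice {α : Type} (d : α) (f : Nat → α → α) (Y : Nat) :
    ∀ (m : Nat) (L : List α), Y + m ≤ L.length →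
    (List.range m).foldl (fun s i => s.set (Y + i) (f i (s.getD (Y + i) d))) L
      = L.take Y ++ (List.range m).map (fun i => f i (L.getD (Y + i) d)) ++ L.drop (Y + m) := by
  intro m
  induction m with
  | zero => intro L h; simp
  | succ m ih =>
    intro L h
    rw [List.range_succ, List.foldl_append, List.foldl_cons, List.foldl_nil, ih L (by omega)]
    have hYlen : (L.take Y).length = Y := by simp; omega
    have hMlen : ((List.range m).map (fun i => f i (L.getD (Y + i) d))).length = m := by simp
    have hidx : Y + m < L.length := by omega
    have hgetD : (L.take Y ++ (List.range m).map (fun i => f i (L.getD (Y + i) d)) ++ L.drop (Y + m)).getD (Y + m) d = L.getD (Y + m) d := by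
      rw [List.append_assoc, List.getD_eq_getElem?_getD, List.getD_eq_getElem?_getD,
          List.getElem?_append_right (by rw [hYlen]; omega), hYlen]
      have h2 : Y + m - Y = m := by omega
      rw [h2, List.getElem?_append_right (by rw [hMlen]), hMlen, Nat.sub_self,
          List.getElem?_drop, Nat.add_zero]
    rw [hgetD, List.append_assoc, List.set_append, if_neg (by rw [hYlen]; omega), hYlen]
    have h3 : Y + m - Y = m := by omega
    rw [h3, List.set_append, if_neg (by rw [hMlen]; omega), hMlen, Nat.sub_self,
        List.drop_eq_getElem_cons hidx, List.set_cons_zero, List.map_append]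
    simp only [List.append_assoc, List.singleton_append, List.map_cons, List.map_nil]
    have h4 : Y + (m + 1) = Y + m + 1 := by omega
    rw [h4]

theorem pvPyRangeNat (N : Nat) : PySem.List.pyRange 0 (N:Int) 1 = (List.range N).map (Nat.cast : Nat → Int) := by
  rw [PySem.List.pyRange_one]
  simp

theorem pvRotOnceA_char (g : List (List Int)) (X Y N : Nat)
    (hYN : Y + N ≤ g.length)
    (hrow : ∀ k < N, X + N ≤ (g.getD (Y + k) []).length) :
    pvRotOnceA g (X : Int) (Y : Int) (N : Int) = pvSplice g X Y N := by
  unfold pvRotOnceA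
  simp only [pvPyRangeNat, List.foldl_map, List.map_map]
  refine Eq.trans (PySem.List.foldl_congr_mem _ _ (fun (s : List (List Int)) (i : Nat) =>
      s.set (Y + i) ((List.range N).foldl
        (fun row j => row.set (X + j) ((g.getD (Y + (N - 1 - j)) []).getD (X + i) 0))
        (s.getD (Y + i) []))) _ ?_) ?_
  · intro s i hi
    have hiN : i < N := List.mem_range.mp hi
    beta_reduce
    rw [← pvFoldSetRow (c := fun j => X + j)
        (v := fun j => (g.getD (Y + (N - 1 - j)) []).getD (X + i) 0)]
    apply PySem.List.foldl_congr_mem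
    intro acc j hj
    have hjN : j < N := List.mem_range.mp hj
    show pvSetCell acc ((Y:Int) + i) ((X:Int) + j) _ = _
    have e1 : ((N:Int) - 1 - (j:Int)) = ((N - 1 - j : Nat) : Int) := by omega
    have e2 : ((Y:Int) + (i:Int)) = ((Y + i : Nat) : Int) := by omega
    have e3 : ((X:Int) + (j:Int)) = ((X + j : Nat) : Int) := by omega
    have e4 : ((Y:Int) + ((N - 1 - j : Nat) : Int)) = ((Y + (N - 1 - j) : Nat) : Int) := by omega
    have e5 : ((X:Int) + (i:Int)) = ((X + i : Nat) : Int) := by omega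
    rw [e1, PySem.List.pyGetD_natCast, PySem.List.pyGetD_natCast,
        PySem.List.getD_map_range _ _ _ _ (by omega)]
    simp only [Function.comp_apply]
    rw [PySem.List.getD_map_range _ _ _ _ hiN]
    simp only [Function.comp_apply]
    unfold pvCell pvSetCell
    rw [e4, e5, e2, e3]
    simp only [PySem.List.pyGetD_natCast, PySem.List.pySetD_natCast]
  · rw [pvFoldSetSplice [] (fun i row => (List.range N).foldl
      (fun row j => row.set (X + j) ((g.getD (Y + (N - 1 - j)) []).getD (X + i) 0)) row) Y N g hYN]
    unfold pvSplice
    congr 2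
    apply List.map_congr_left
    intro i hi
    have hiN : i < N := List.mem_range.mp hi
    exact pvFoldSetSplice (0:Int)
      (fun j _ => (g.getD (Y + (N - 1 - j)) []).getD (X + i) 0) X N
      (g.getD (Y + i) []) (hrow i hiN)

theorem pvDropTakeGetD (L : List Int) (X N i : Nat) (hi : i < N) (hlen : X + N ≤ L.length) :
    ((L.drop X).take N).getD i 0 = L.getD (X + i) 0 := by
  have h1 : i < ((L.drop X).take N).length := by simp; omega
  have h2 : X + i < L.length := by omega
  rw [List.getD_eq_getElem _ _ h1, List.getD_eq_getElem _ _ h2]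
  simp [List.getElem_take, List.getElem_drop]

theorem pvThreeAppendGetElem {α : Type} (A B C : List α) (r : Nat) (h : r < (A ++ B ++ C).length) :
    (A ++ B ++ C)[r] = if h1 : r < A.length then A[r]
      else if h2 : r - A.length < B.length then B[r - A.length]
      else C[r - A.length - B.length]'(by simp at h; omega) := by
  rcases Nat.lt_or_ge r A.length with h1 | h1
  · rw [dif_pos h1, List.getElem_append_left (by simp; omega), List.getElem_append_left h1]
  · rcases Nat.lt_or_ge (r - A.length) B.length with h2 | h2
    · rw [dif_neg (by omega), dif_pos h2]
      rw [List.getElem_append_left (by simp; omega), List.getElem_append_right h1]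
    · rw [dif_neg (by omega), dif_neg (by omega)]
      rw [List.getElem_append_right (by simp; omega)]
      congr 1
      simp
      omega

theorem pvRotOnceB_char (g : List (List Int)) (X Y N : Nat)
    (hYN : Y + N ≤ g.length)
    (hrow : ∀ k < N, X + N ≤ (g.getD (Y + k) []).length) :
    pvRotOnceB g (X : Int) (Y : Int) (N : Int) = pvSplice g X Y N := by
  simp only [pvRotOnceB]
  apply List.ext_getElem
  · rw [List.length_map, PySem.List.length_enumerate]
    unfold pvSplice
    simp
    omega
  · intro r h1 h2
    rw [List.getElem_map, PySem.List.getElem_enumerate g 0 r (by rwa [List.length_map] at h1)]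
    have hr : r < g.length := by rwa [List.length_map, PySem.List.length_enumerate] at h1
    simp only [zero_add]
    have hYlen : (g.take Y).length = Y := by simp; omega
    have hMlen : ((List.range N).map (fun i =>
        (g.getD (Y + i) []).take X
          ++ (List.range N).map (fun j => (g.getD (Y + (N - 1 - j)) []).getD (X + i) 0)
          ++ (g.getD (Y + i) []).drop (X + N))).length = N := by simp
    by_cases hcase : Y ≤ r ∧ r < Y + N
    · rw [if_pos (by omega)]
      unfold pvSplice
      rw [pvThreeAppendGetElem]
      rw [dif_neg (by rw [hYlen]; omega), dif_pos (by rw [hYlen, hMlen]; omega)]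
      simp only [hYlen]
      rw [List.getElem_map, List.getElem_range]
      have hgr : g.getD (Y + (r - Y)) [] = g[r] := by
        have hYr : Y + (r - Y) = r := by omega
        rw [hYr, List.getD_eq_getElem _ _ hr]
      rw [hgr]
      rw [PySem.List.slice_to _ (by omega : (0:Int) ≤ (X:Int)),
          PySem.List.slice_from _ (by omega : (0:Int) ≤ (X:Int) + (N:Int))]
      have ht1 : ((X:Int)).toNat = X := by omega
      have ht2 : ((X:Int) + (N:Int)).toNat = X + N := by omega
      rw [ht1, ht2]
      congr 2
      -- middle part
      have e1 : (r:Int) - (Y:Int) = ((r - Y : Nat) : Int) := by omega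
      rw [e1, PySem.List.pyGetD_map_pyRange_of_nonneg _ _ _ _ (by omega) (by omega)]
      apply List.ext_getElem
      · simp [PySem.List.length_pyRange_one]
      · intro j hj1 hj2
        have hjN : j < N := by
          simpa [PySem.List.length_pyRange_one] using hj1
        rw [List.getElem_map, List.getElem_reverse]
        rw [List.getElem_map]
        rw [PySem.List.getElem_pyRange_one _ _ _ (by simp [PySem.List.length_pyRange_one]; omega)]
        simp only [zero_add, List.length_map, PySem.List.length_pyRange_one]
        have hidx : ((N:Int) - 0).toNat - 1 - j = N - 1 - j := by omega
        rw [hidx]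
        have e2 : (Y:Int) + ((N - 1 - j : Nat) : Int) = ((Y + (N - 1 - j) : Nat) : Int) := by omega
        rw [e2, PySem.List.pyGetD_natCast, PySem.List.slice_natCast_add, PySem.List.pyGetD_natCast]
        rw [pvDropTakeGetD _ _ _ _ (by omega) (hrow (N - 1 - j) (by omega))]
        rw [List.getElem_map, List.getElem_range]
    · rw [if_neg (by omega)]
      unfold pvSplice
      rw [pvThreeAppendGetElem]
      rcases Nat.lt_or_ge r Y with hlt | hge
      · rw [dif_pos (by rw [hYlen]; omega)]
        rw [List.getElem_take]
      · rw [dif_neg (by rw [hYlen]; omega), dif_neg (by rw [hYlen, hMlen]; omega)]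
        simp only [hYlen, hMlen]
        rw [List.getElem_drop]
        congr 1
        omega

theorem pvSplice_length (g : List (List Int)) (X Y N : Nat) (hYN : Y + N ≤ g.length) :
    (pvSplice g X Y N).length = g.length := by
  unfold pvSplice; simp; omega

theorem pvSplice_row_length (g : List (List Int)) (X Y N : Nat) (hYN : Y + N ≤ g.length)
    (hrow : ∀ k < N, X + N ≤ (g.getD (Y + k) []).length) (r : Nat) :
    ((pvSplice g X Y N).getD r []).length = (g.getD r []).length := by
  rcases Nat.lt_or_ge r g.length with hr | hr
  · rw [List.getD_eq_getElem _ _ (by rw [pvSplice_length g X Y N hYN]; exact hr),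
        List.getD_eq_getElem _ _ hr]
    have hYlen : (g.take Y).length = Y := by simp; omega
    have hMlen : ((List.range N).map (fun i =>
        (g.getD (Y + i) []).take X
          ++ (List.range N).map (fun j => (g.getD (Y + (N - 1 - j)) []).getD (X + i) 0)
          ++ (g.getD (Y + i) []).drop (X + N))).length = N := by simp
    unfold pvSplice
    rw [pvThreeAppendGetElem]
    rcases Nat.lt_or_ge r Y with h1 | h1
    · rw [dif_pos (by rw [hYlen]; omega)]
      rw [List.getElem_take]
    · rcases Nat.lt_or_ge r (Y + N) with h2 | h2
      · rw [dif_neg (by rw [hYlen]; omega), dif_pos (by rw [hYlen, hMlen]; omega)]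
        simp only [hYlen]
        rw [List.getElem_map, List.getElem_range]
        have hgr : g.getD (Y + (r - Y)) [] = g[r] := by
          have hYr : Y + (r - Y) = r := by omega
          rw [hYr, List.getD_eq_getElem _ _ hr]
        rw [hgr]
        have hlen2 := hrow (r - Y) (by omega)
        rw [hgr] at hlen2
        simp
        omega
      · rw [dif_neg (by rw [hYlen]; omega), dif_neg (by rw [hYlen, hMlen]; omega)]
        simp only [hYlen, hMlen]
        rw [List.getElem_drop]
        congr 2
        omega
  · rw [List.getD_eq_default _ _ (by rw [pvSplice_length g X Y N hYN]; exact hr),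
        List.getD_eq_default _ _ hr]

theorem pvFoldEq (grid : List (List Int)) (ops : List (List (String × Int))) :
    ∀ (s : List (List Int)),
    (∀ op ∈ ops, pvOpOK grid op = true) → s.length = grid.length →
    (∀ r : Nat, (s.getD r []).length = (grid.getD r []).length) →
    ops.foldl (fun g op =>
      match (PySem.Dict.ofList op).get? "x", (PySem.Dict.ofList op).get? "y", (PySem.Dict.ofList op).get? "n" with
      | some x, some y, some n => if pvValid (grid.length : Int) x y n then pvRotOnceA g x y n else g
      | _, _, _ => g) s
    = ops.foldl (fun g op =>
      match (PySem.Dict.ofList op).get? "x" with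
      | none => g
      | some x =>
        match (PySem.Dict.ofList op).get? "y" with
        | none => g
        | some y =>
          match (PySem.Dict.ofList op).get? "n" with
          | none => g
          | some n => if pvValidAlt (grid.length : Int) x y n then pvRotOnceB g x y n else g) s := by
  induction ops with
  | nil => intro s _ _ _; rfl
  | cons op rest ih =>
    intro s hok hlen hrows
    simp only [List.foldl_cons]
    have hop := hok op (List.mem_cons_self ..)
    simp only [pvOpOK] at hop
    rcases hx : (PySem.Dict.ofList op).get? "x" with _ | x <;> rw [hx] at hop
    · simp at hop
    rcases hy : (PySem.Dict.ofList op).get? "y" with _ | y <;> rw [hy] at hop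
    · simp at hop
    rcases hn : (PySem.Dict.ofList op).get? "n" with _ | n <;> rw [hn] at hop
    · simp at hop
    dsimp only
    simp only [Option.bind_some, Option.map_some, Option.getD_some, Bool.and_eq_true,
      decide_eq_true_eq] at hop
    obtain ⟨hvP, hcond⟩ := hop
    obtain ⟨X, rfl⟩ := Int.eq_ofNat_of_zero_le hvP.1
    obtain ⟨Y, rfl⟩ := Int.eq_ofNat_of_zero_le hvP.2.2.1
    obtain ⟨N, rfl⟩ := Int.eq_ofNat_of_zero_le (by omega : (0:Int) ≤ n)
    have hYN : Y + N ≤ s.length := by rw [hlen]; omega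
    have hrow' : ∀ k < N, X + N ≤ (s.getD (Y + k) []).length := by
      intro k hk
      have hmem : ((k : Int)) ∈ PySem.List.pyRange 0 (N : Int) 1 := by
        rw [PySem.List.mem_pyRange_one]; omega
      have hc := hcond _ hmem
      have htn : ((Y : Int) + (k : Int)).toNat = Y + k := by omega
      rw [htn] at hc
      rw [hrows (Y + k)]
      omega
    have hA : pvValid (grid.length : Int) (X : Int) (Y : Int) (N : Int) = true := by
      simp only [pvValid, decide_eq_true_eq]; exact hvP
    have hB : pvValidAlt (grid.length : Int) (X : Int) (Y : Int) (N : Int) = true := by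
      simp only [pvValidAlt, decide_eq_true_eq]; exact hvP
    rw [hA, hB]
    simp only [if_true]
    rw [pvRotOnceA_char s X Y N hYN hrow', pvRotOnceB_char s X Y N hYN hrow']
    exact ih (pvSplice s X Y N) (fun o ho => hok o (List.mem_cons_of_mem _ ho))
      (by rw [pvSplice_length s X Y N hYN]; exact hlen)
      (fun r => by rw [pvSplice_row_length s X Y N hYN hrow' r]; exact hrows r)

-- ===== VERDICT (by name: the statement is the Claim_ definition above) =====
theorem apply_ops_spec : Claim_equal_apply_ops := by
  intro grid ops _ hpre
  show apply_ops grid ops = apply_ops_alt grid ops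
  unfold apply_ops apply_ops_alt
  have hg : grid.map (fun row => PySem.List.slice row none none) = grid := by
    simp [PySem.List.slice_none_none]
  simp only [hg]
  exact pvFoldEq grid ops grid hpre rfl (fun r => rfl)
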